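-- pv_equiv track=rewrite | github.com/tien1020/Python-Scripts | 8-queens.py | hillclimb_helper
-- ===== SOURCE A (Python) =====
-- def compute_h(list):
--     h = 0
--     for i in range(8):
--         for j in range(i + 1, 8):
--             if (list[i] == list[j]) or (abs(list[j] - list[i]) == j - i):
--                 h += 1
--     return h
--
-- def hillclimb_helper(list, search_cost):
--     current_h = compute_h(list)
--     # if the board is solved, return true and the search_cost
--     if current_h == 0:
--         return (True, search_cost)
--     # choose the new board configuration that yields the smallest h
--     best_h = current_h
--     best_list = list
--     # try to move queen at row i
--     for i in range(8):
--         for col in range(8):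
--             if col == list[i]:
--                 continue
--             new_list = list.copy()
--             new_list[i] = col
--             new_h = compute_h(new_list)
--             search_cost += 1
--             if new_h < best_h:
--                 best_h = new_h
--                 best_list = new_list
--     if best_h < current_h:
--         return hillclimb_helper(best_list, search_cost)
--     else:
--         return (False, search_cost)
-- ===== SOURCE B (Python) =====
-- def compute_h(list):
--     return sum(1 for i in range(8) for j in range(i + 1, 8)
--                if list[i] == list[j] or abs(list[j] - list[i]) == j - i)
--
-- def hillclimb_helper(list, search_cost):
--     while True:
--         current_h = compute_h(list)
--         if current_h == 0:
--             return (True, search_cost)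
--         cands = [(compute_h(list[:i] + [col] + list[i + 1:]),
--                   list[:i] + [col] + list[i + 1:])
--                  for i in range(8) for col in range(8) if col != list[i]]
--         search_cost += len(cands)
--         best_h, best_list = min(cands, key=lambda t: t[0])
--         if best_h < current_h:
--             list = best_list
--         else:
--             return (False, search_cost)
-- ===== Notes on version B (the rewrite author's own statement) =====
-- stated objective: alternative
-- what changed: The tail-recursive driver becomes an iterative while-loop that materialises the full neighbour list in one comprehension, adds its length to search_cost, and selects the best neighbour with min-by-key instead of a running-best accumulator; compute_h becomes a sum over a generator.
-- outside the precondition, e.g. on hillclimb_helper([0, 1, 2], 5): A raises IndexError, B raises IndexError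
import Mathlib
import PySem

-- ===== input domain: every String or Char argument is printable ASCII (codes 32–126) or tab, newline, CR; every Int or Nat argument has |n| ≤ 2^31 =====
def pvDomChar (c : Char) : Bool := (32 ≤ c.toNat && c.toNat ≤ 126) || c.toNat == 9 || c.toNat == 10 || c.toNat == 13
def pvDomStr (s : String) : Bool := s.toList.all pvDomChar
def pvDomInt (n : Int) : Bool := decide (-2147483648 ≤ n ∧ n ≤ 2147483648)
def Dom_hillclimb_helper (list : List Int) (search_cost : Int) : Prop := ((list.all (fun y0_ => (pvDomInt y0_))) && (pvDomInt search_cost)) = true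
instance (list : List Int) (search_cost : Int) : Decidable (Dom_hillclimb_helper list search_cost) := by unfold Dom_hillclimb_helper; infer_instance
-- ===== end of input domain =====

-- B rewrites the tail-recursive driver as an iterative climb that materialises the whole
-- neighbour list, bumps search_cost by its length and picks the best neighbour with min-by-key
-- (objective: alternative decomposition, same cost).
-- Both Lean ports use a fuel counter only as a totality guard: the conflict count strictly
-- decreases on every recursive step and is bounded by it, so the fuel never runs out.

-- ===== PORT A =====
def pvConflictA (l : List Int) (i j : Int) : Bool :=
  (PySem.List.pyGetD l i 0 == PySem.List.pyGetD l j 0) ||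
    (|PySem.List.pyGetD l j 0 - PySem.List.pyGetD l i 0| == j - i)

def compute_h (l : List Int) : Int :=
  (PySem.List.pyRange 0 8 1).foldl (fun h i =>
    (PySem.List.pyRange (i + 1) 8 1).foldl (fun h j =>
      if pvConflictA l i j then h + 1 else h) h) 0

def hillclimbA_loop : Nat → List Int → Int → Bool × Int
  | 0, _, sc => (false, sc)
  | fuel + 1, l, sc =>
    let cur := compute_h l
    if cur = 0 then (true, sc)
    else
      -- the double loop over i and col carrying (best_h, best_list, search_cost)
      let st := (PySem.List.pyRange 0 8 1).foldl (fun (s : Int × List Int × Int) i =>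
        (PySem.List.pyRange 0 8 1).foldl (fun (s : Int × List Int × Int) col =>
          if col == PySem.List.pyGetD l i 0 then s
          else
            let nl := PySem.List.pySetD l i col
            let nh := compute_h nl
            if nh < s.1 then (nh, nl, s.2.2 + 1) else (s.1, s.2.1, s.2.2 + 1)) s) (cur, l, sc)
      if st.1 < cur then hillclimbA_loop fuel st.2.1 st.2.2
      else (false, st.2.2)

def hillclimb_helper (list : List Int) (search_cost : Int) : Bool × Int :=
  hillclimbA_loop ((compute_h list).toNat + 1) list search_cost

-- ===== PORT B =====
def pvConflictB (l : List Int) (i j : Int) : Bool :=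
  (PySem.List.pyGetD l i 0 == PySem.List.pyGetD l j 0) ||
    (|PySem.List.pyGetD l j 0 - PySem.List.pyGetD l i 0| == j - i)

def compute_h_alt (l : List Int) : Int :=
  (((PySem.List.pyRange 0 8 1).flatMap (fun i =>
    (PySem.List.pyRange (i + 1) 8 1).filter (fun j => pvConflictB l i j))).length : Int)

-- list[:i] + [col] + list[i+1:]
def pvNeighbor (l : List Int) (i col : Int) : List Int :=
  PySem.List.slice l none (some i) ++ [col] ++ PySem.List.slice l (some (i + 1)) none

def pvCands (l : List Int) : List (Int × List Int) :=
  (PySem.List.pyRange 0 8 1).flatMap (fun i =>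
    ((PySem.List.pyRange 0 8 1).filter (fun col => col != PySem.List.pyGetD l i 0)).map
      (fun col => (compute_h_alt (pvNeighbor l i col), pvNeighbor l i col)))

def hillclimbB_loop : Nat → List Int → Int → Bool × Int
  | 0, _, sc => (false, sc)
  | fuel + 1, l, sc =>
    let cur := compute_h_alt l
    if cur = 0 then (true, sc)
    else
      let cands := pvCands l
      let sc' := sc + (cands.length : Int)
      match PySem.List.min? cands Prod.fst with
      | none => (false, sc')   -- unreachable under Pre_ (Python's min would raise on [])
      | some (bh, bl) => if bh < cur then hillclimbB_loop fuel bl sc' else (false, sc')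

def hillclimb_helper_alt (list : List Int) (search_cost : Int) : Bool × Int :=
  hillclimbB_loop ((compute_h_alt list).toNat + 1) list search_cost

-- ===== PRECONDITION & SPEC =====
-- Python A indexes list[i] for i in range(8): it raises IndexError iff the list has fewer than 8 elements.
def Pre_hillclimb_helper (list : List Int) (search_cost : Int) : Prop := 8 ≤ list.length
instance (list : List Int) (search_cost : Int) : Decidable (Pre_hillclimb_helper list search_cost) := by unfold Pre_hillclimb_helper; infer_instance
def pvWitness_hillclimb_helper : List Int × Int := ([0, 1, 2, 3, 4, 5, 6, 7], 0)

def Spec_hillclimb_helper (list : List Int) (search_cost : Int) (out : Bool × Int) : Prop := out = hillclimb_helper_alt list search_cost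
instance (list : List Int) (search_cost : Int) (out : Bool × Int) : Decidable (Spec_hillclimb_helper list search_cost out) := by unfold Spec_hillclimb_helper; infer_instance

-- ===== CLAIM (what is proved, stated in full; the proofs are below) =====
def Claim_equal_hillclimb_helper : Prop := ∀ (list : List Int) (search_cost : Int), Dom_hillclimb_helper list search_cost → Pre_hillclimb_helper list search_cost → Spec_hillclimb_helper list search_cost (hillclimb_helper list search_cost)

-- ===== LEMMAS AND PROOFS =====

theorem pvConflict_eq : pvConflictA = pvConflictB := rfl

-- the inner counting loop of A's compute_h is a filter length
theorem pv_count_inner (l : List Int) (i : Int) (ys : List Int) (h : Int) :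
    ys.foldl (fun h j => if pvConflictA l i j then h + 1 else h) h
      = h + (((ys.filter (fun j => pvConflictB l i j)).length : Int)) := by
  rw [PySem.List.foldl_count_if (fun j => pvConflictA l i j) ys h]
  simp [pvConflict_eq, List.countP_eq_length_filter]

theorem pv_outer (l : List Int) : ∀ (xs : List Int) (h : Int),
    xs.foldl (fun h i =>
        (PySem.List.pyRange (i + 1) 8 1).foldl (fun h j => if pvConflictA l i j then h + 1 else h) h) h
      = h + (((xs.flatMap (fun i =>
          (PySem.List.pyRange (i + 1) 8 1).filter (fun j => pvConflictB l i j))).length : Int)) := by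
  intro xs h
  simp only [pv_count_inner]
  rw [PySem.List.foldl_add xs (fun i => (((PySem.List.pyRange (i + 1) 8 1).filter (fun j => pvConflictB l i j)).length : Int)) h]
  rw [List.length_flatMap]
  congr 1
  induction xs with
  | nil => simp
  | cons x xs ih => simp [ih]

theorem compute_h_eq (l : List Int) : compute_h l = compute_h_alt l := by
  unfold compute_h compute_h_alt
  rw [pv_outer]
  simp

-- Python min over a nonempty list is the running strict-best fold
theorem pv_min?_cons : ∀ (cs : List (Int × List Int)) (c : Int × List Int),
    PySem.List.min? (c :: cs) Prod.fst
      = some (cs.foldl (fun (s : Int × List Int) c => if c.1 < s.1 then c else s) c) := by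
  intro cs
  induction cs with
  | nil => intro c; rfl
  | cons d ds ih =>
      intro c
      have h1 : PySem.List.min? (c :: d :: ds) Prod.fst
          = PySem.List.min? ((if d.1 < c.1 then d else c) :: ds) Prod.fst := by
        by_cases hd : d.1 < c.1 <;> simp [PySem.List.min?, hd]
      rw [h1, ih, List.foldl_cons]

-- running strict-best fold expressed through Python min (first minimal element)
theorem pv_foldl_min? (cs : List (Int × List Int)) : ∀ (p : Int × List Int),
    cs.foldl (fun (s : Int × List Int) c => if c.1 < s.1 then c else s) p
      = ((PySem.List.min? cs Prod.fst).elim p (fun m => if m.1 < p.1 then m else p)) := by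
  induction cs with
  | nil => intro p; simp [PySem.List.min?]
  | cons c cs ih =>
      intro p
      rw [List.foldl_cons, ih, pv_min?_cons, ih c]
      cases hm : PySem.List.min? cs Prod.fst with
      | none => simp
      | some m =>
          simp only [Option.elim]
          split_ifs <;> first | rfl | (exfalso; omega)

-- the three-component loop state splits into the best pair and the counter
theorem pv_fold3 : ∀ (cs : List (Int × List Int)) (b : Int × List Int) (sc : Int),
    cs.foldl (fun (s : Int × List Int × Int) (c : Int × List Int) =>
        if c.1 < s.1 then (c.1, c.2, s.2.2 + 1) else (s.1, s.2.1, s.2.2 + 1)) (b.1, b.2, sc)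
      = ((cs.foldl (fun (s : Int × List Int) c => if c.1 < s.1 then c else s) b).1,
         (cs.foldl (fun (s : Int × List Int) c => if c.1 < s.1 then c else s) b).2,
         sc + (cs.length : Int)) := by
  intro cs
  induction cs with
  | nil => intro b sc; simp
  | cons c cs ih =>
      intro b sc
      simp only [List.foldl_cons]
      by_cases h : c.1 < b.1 <;>
        simp only [h, ite_true, ite_false, ih, List.length_cons, Prod.mk.injEq] <;>
        exact ⟨trivial, trivial, by push_cast; ring⟩
        
theorem pv_foldl_flatMap {α : Type} (g : Int → List α) (step : (Int × List Int × Int) → α → (Int × List Int × Int)) :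
    ∀ (is : List Int) (init : Int × List Int × Int),
    (is.flatMap g).foldl step init = is.foldl (fun s i => (g i).foldl step s) init := by
  intro is
  induction is with
  | nil => intro init; rfl
  | cons i is ih => intro init; simp [List.foldl_append, ih]

theorem pv_neighbor_set (l : List Int) (i col : Int) (h0 : 0 ≤ i) (hlt : i < (l.length : Int)) :
    PySem.List.pySetD l i col = pvNeighbor l i col := by
  rw [PySem.List.pySetD_of_nonneg l col h0]
  unfold pvNeighbor
  rw [PySem.List.slice_to l h0, PySem.List.slice_from l (by omega)]
  rw [List.set_eq_take_append_cons_drop]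
  have : i.toNat < l.length := by omega
  have h1 : (i + 1).toNat = i.toNat + 1 := by omega
  simp [this, h1]

theorem pv_neighbor_length (l : List Int) (i col : Int) (h0 : 0 ≤ i) (hlt : i < (l.length : Int)) :
    (pvNeighbor l i col).length = l.length := by
  unfold pvNeighbor
  rw [PySem.List.slice_to l h0, PySem.List.slice_from l (by omega)]
  simp
  omega

-- A's double loop over (i, col) with the skip = a fold over B's candidate list,
-- carrying best and cost separately
theorem pv_loopA_fold (l : List Int) (hl : 8 ≤ l.length) (b : Int × List Int) (sc : Int) :
    (PySem.List.pyRange 0 8 1).foldl (fun (s : Int × List Int × Int) i =>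
        (PySem.List.pyRange 0 8 1).foldl (fun (s : Int × List Int × Int) col =>
          if col == PySem.List.pyGetD l i 0 then s
          else
            let nl := PySem.List.pySetD l i col
            let nh := compute_h nl
            if nh < s.1 then (nh, nl, s.2.2 + 1) else (s.1, s.2.1, s.2.2 + 1)) s) (b.1, b.2, sc)
      = (((pvCands l).foldl (fun (s : Int × List Int) c => if c.1 < s.1 then c else s) b).1,
         ((pvCands l).foldl (fun (s : Int × List Int) c => if c.1 < s.1 then c else s) b).2,
         sc + ((pvCands l).length : Int)) := by
  rw [← pv_fold3]
  unfold pvCands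
  rw [pv_foldl_flatMap]
  apply PySem.List.foldl_congr_mem
  intro s i hi
  rw [PySem.List.mem_pyRange_one] at hi
  rw [List.foldl_map, List.foldl_filter]
  apply PySem.List.foldl_congr_mem
  intro acc col _
  simp only [pv_neighbor_set l i col hi.1 (by omega), compute_h_eq]
  by_cases h : col = PySem.List.pyGetD l i 0 <;> simp [h, bne]

theorem pv_cands_length (l : List Int) (hl : 8 ≤ l.length) :
    ∀ m ∈ pvCands l, m.2.length = l.length := by
  intro m hm
  unfold pvCands at hm
  simp only [List.mem_flatMap, List.mem_map, List.mem_filter] at hm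
  obtain ⟨i, hi, col, ⟨hcol, _⟩, rfl⟩ := hm
  rw [PySem.List.mem_pyRange_one] at hi
  exact pv_neighbor_length l i col hi.1 (by omega)

theorem pv_loop_eq : ∀ (fuel : Nat) (l : List Int) (sc : Int), 8 ≤ l.length →
    hillclimbA_loop fuel l sc = hillclimbB_loop fuel l sc := by
  intro fuel
  induction fuel with
  | zero => intro l sc _; rfl
  | succ fuel ih =>
      intro l sc hl
      simp only [hillclimbA_loop, hillclimbB_loop]
      rw [compute_h_eq l]
      by_cases h0 : compute_h_alt l = 0
      · simp [h0]
      · simp only [h0, if_false]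
        rw [show ((compute_h_alt l, l, sc) : Int × List Int × Int) = (((compute_h_alt l, l) : Int × List Int).1, ((compute_h_alt l, l) : Int × List Int).2, sc) from rfl]
        rw [pv_loopA_fold l hl (compute_h_alt l, l) sc]
        rw [pv_foldl_min? (pvCands l) (compute_h_alt l, l)]
        cases hm : PySem.List.min? (pvCands l) Prod.fst with
        | none => simp
        | some m =>
            simp only [Option.elim]
            by_cases hb : m.1 < compute_h_alt l
            · have hmem := PySem.List.min?_mem hm
              have hlen : 8 ≤ m.2.length := by
                rw [pv_cands_length l hl m hmem]; exact hl
              simp [hb, ih m.2 _ hlen]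
            · simp [hb]

-- ===== VERDICT (by name: the statement is the Claim_ definition above) =====
theorem hillclimb_helper_spec : Claim_equal_hillclimb_helper := by
  intro l sc _ hpre
  unfold Spec_hillclimb_helper hillclimb_helper hillclimb_helper_alt
  rw [compute_h_eq]
  exact pv_loop_eq _ l sc hpre
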